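-- pv_equiv track=rewrite | github.com/fiifidawson/Data_Structures_and_Algorithms | TechElevatePlan/Codes/Word_Builder.py | wordBuilder
-- ===== SOURCE A (Python) =====
-- def wordBuilder(array):
--     # Create an empty array to store the combinations
--     collection = []
--     # Loop through each word in the array
--     for i in range(len(array)):
--         # Loop through each word in the array again
--         for j in range(len(array)):
--             # Loop through each word in the array a third time
--             for k in range(len(array)):
--                 # Check that the three words being combined are all different
--                 if i != j and j != k and i != k:
--                     # Add the combined word to the collection
--                     collection.append(array[i] + array[j] + array[k])
--
--     # Return the collection of combinations
--     return collection
-- ===== SOURCE B (Python) =====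
-- def wordBuilder(array):
--     # Selection by removal: pick each word, remove it, pick from the rest,
--     # remove again, then combine with every remaining word. No index guard needed.
--     result = []
--     for i, a in enumerate(array):
--         rest1 = array[:i] + array[i+1:]
--         for j, b in enumerate(rest1):
--             rest2 = rest1[:j] + rest1[j+1:]
--             for c in rest2:
--                 result.append(a + b + c)
--     return result
-- ===== Notes on version B (the rewrite author's own statement) =====
-- stated objective: alternative
-- what changed: Replaces the triple index loop over the whole array with an i!=j!=k guard by selection-by-removal: each chosen word is sliced out before the next level iterates, so no distinctness test is needed.
import Mathlib
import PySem

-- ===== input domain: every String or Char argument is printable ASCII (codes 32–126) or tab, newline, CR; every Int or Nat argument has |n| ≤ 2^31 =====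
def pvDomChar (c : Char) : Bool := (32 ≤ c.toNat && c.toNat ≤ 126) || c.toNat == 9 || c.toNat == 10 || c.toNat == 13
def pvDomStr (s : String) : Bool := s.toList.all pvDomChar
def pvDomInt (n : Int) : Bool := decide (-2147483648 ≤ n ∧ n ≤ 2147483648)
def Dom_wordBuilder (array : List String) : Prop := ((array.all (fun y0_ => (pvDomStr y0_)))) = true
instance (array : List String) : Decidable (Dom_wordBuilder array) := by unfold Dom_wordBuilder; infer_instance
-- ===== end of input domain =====

-- B replaces A's triple index loop with its i!=j!=k guard by selection-by-removal:
-- each chosen word is sliced out before the next level iterates (objective: alternative).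

-- ===== PORT A =====
-- literal port of A: three index loops over range(len(array)), guard i != j and j != k and i != k
def wordBuilder (array : List String) : List String :=
  (PySem.List.pyRange 0 array.length 1).foldl (fun coll i =>
    (PySem.List.pyRange 0 array.length 1).foldl (fun coll j =>
      (PySem.List.pyRange 0 array.length 1).foldl (fun coll k =>
        if i ≠ j ∧ j ≠ k ∧ i ≠ k then
          coll ++ [PySem.List.pyGetD array i "" ++ PySem.List.pyGetD array j "" ++
                   PySem.List.pyGetD array k ""]
        else coll) coll) coll) []

-- ===== PORT B =====
-- literal port of B (Source B): enumerate, slice the chosen word out, no distinctness guard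
def wordBuilder_alt (array : List String) : List String :=
  (PySem.List.enumerate array 0).foldl (fun result p =>
    let i := p.1
    let a := p.2
    let rest1 := PySem.List.slice array none (some i) ++ PySem.List.slice array (some (i + 1)) none
    (PySem.List.enumerate rest1 0).foldl (fun result q =>
      let j := q.1
      let b := q.2
      let rest2 := PySem.List.slice rest1 none (some j) ++ PySem.List.slice rest1 (some (j + 1)) none
      rest2.foldl (fun result c => result ++ [a ++ b ++ c]) result) result) []

-- ===== PRECONDITION & SPEC =====
def Spec_wordBuilder (array : List String) (out : List String) : Prop := out = wordBuilder_alt array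
instance (array : List String) (out : List String) : Decidable (Spec_wordBuilder array out) := by unfold Spec_wordBuilder; infer_instance

-- ===== CLAIM (what is proved, stated in full; the proofs are below) =====
def Claim_equal_wordBuilder : Prop := ∀ (array : List String), Dom_wordBuilder array → Spec_wordBuilder array (wordBuilder array)

-- ===== LEMMAS AND PROOFS =====

-- common middle form of both ports: Nat-indexed selection-by-removal
def wbMid (xs : List String) : List String :=
  (List.range xs.length).flatMap (fun i =>
    (List.range (xs.eraseIdx i).length).flatMap (fun j =>
      ((xs.eraseIdx i).eraseIdx j).map
        (fun c => xs.getD i "" ++ (xs.eraseIdx i).getD j "" ++ c)))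

theorem flatMap_congr_mem {α β : Type} (l : List α) (f g : α → List β) (h : ∀ a ∈ l, f a = g a) :
    l.flatMap f = l.flatMap g := by
  simp only [List.flatMap]
  rw [List.map_congr_left h]

theorem wbFoldIf {α : Type} (l : List α) (p : α → Prop) [DecidablePred p]
    (f : α → String) (acc : List String) :
    l.foldl (fun acc k => if p k then acc ++ [f k] else acc) acc
      = acc ++ l.flatMap (fun k => if p k then [f k] else []) := by
  induction l generalizing acc with
  | nil => simp
  | cons x t ih =>
    by_cases h : p x <;> simp [h, ih, List.append_assoc]

theorem wbA_nat (xs : List String) :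
    wordBuilder xs = (List.range xs.length).flatMap (fun i =>
      (List.range xs.length).flatMap (fun j =>
        (List.range xs.length).flatMap (fun k =>
          if i ≠ j ∧ j ≠ k ∧ i ≠ k then
            [xs.getD i "" ++ xs.getD j "" ++ xs.getD k ""] else []))) := by
  unfold wordBuilder
  simp only [wbFoldIf, PySem.List.foldl_append_eq_flatMap, List.nil_append]
  rw [PySem.List.pyRange_one]
  simp only [List.flatMap_map, Int.sub_zero, Int.zero_add, Int.toNat_natCast,
    PySem.List.pyGetD_natCast, Nat.cast_inj, ne_eq]

theorem wbL0 (xs : List String) (f : String → List String) :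
    (List.range xs.length).flatMap (fun k => f (xs.getD k "")) = xs.flatMap f := by
  induction xs with
  | nil => simp
  | cons x t ih =>
    simp only [List.length_cons, List.range_succ_eq_map, List.flatMap_cons, List.flatMap_map]
    simpa using congrArg (f (x) ++ ·) ih

theorem wbL1 (n i : Nat) (G : Nat → List String) (hi : i < n) :
    (List.range n).flatMap (fun k => if k = i then [] else G (if i < k then k - 1 else k))
      = (List.range (n - 1)).flatMap G := by
  induction n generalizing i G with
  | zero => omega
  | succ n ih =>
    rw [List.range_succ, List.flatMap_append]
    by_cases hin : i = n
    · subst hin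
      rw [flatMap_congr_mem (List.range i) _ G (by
        intro a ha
        have : a < i := List.mem_range.mp ha
        rw [if_neg (by omega), if_neg (by omega)])]
      simp
    · have hi2 : i < n := by omega
      rw [ih i G hi2]
      have hn1 : List.range (n + 1 - 1) = List.range (n - 1) ++ [n - 1] := by
        rw [Nat.add_sub_cancel, show n = (n - 1) + 1 by omega, List.range_succ]
        simp
      rw [hn1, List.flatMap_append]
      simp only [List.flatMap_cons, List.flatMap_nil, List.append_nil]
      rw [if_neg (by omega : ¬ n = i), if_pos hi2]

theorem wbL2 (xs : List String) (i k : Nat) (_hk : k < xs.length) (hne : k ≠ i) :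
    (xs.eraseIdx i).getD (if i < k then k - 1 else k) "" = xs.getD k "" := by
  rw [List.getD_eq_getElem?_getD, List.getD_eq_getElem?_getD]
  by_cases h : i < k
  · rw [if_pos h, List.getElem?_eraseIdx, if_neg (by omega)]
    congr 2
    omega
  · rw [if_neg h, List.getElem?_eraseIdx, if_pos (by omega)]

theorem wbAN_mid (xs : List String) :
    (List.range xs.length).flatMap (fun i =>
      (List.range xs.length).flatMap (fun j =>
        (List.range xs.length).flatMap (fun k =>
          if i ≠ j ∧ j ≠ k ∧ i ≠ k then
            [xs.getD i "" ++ xs.getD j "" ++ xs.getD k ""] else []))) = wbMid xs := by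
  unfold wbMid
  apply flatMap_congr_mem
  intro i hi
  have hi' : i < xs.length := List.mem_range.mp hi
  have hlen1 : (xs.eraseIdx i).length = xs.length - 1 := by
    rw [List.length_eraseIdx]; simp [hi']
  -- step 1: unguard into nested skip form
  have e1 : (List.range xs.length).flatMap (fun j =>
        (List.range xs.length).flatMap (fun k =>
          if i ≠ j ∧ j ≠ k ∧ i ≠ k then [xs.getD i "" ++ xs.getD j "" ++ xs.getD k ""] else []))
      = (List.range xs.length).flatMap (fun j => if j = i then [] else
          (fun m => (List.range (xs.length - 1)).flatMap (fun t => if t = m then []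
            else [xs.getD i "" ++ (xs.eraseIdx i).getD m "" ++ (xs.eraseIdx i).getD t ""]))
          (if i < j then j - 1 else j)) := by
    apply flatMap_congr_mem
    intro j hj
    have hj' : j < xs.length := List.mem_range.mp hj
    by_cases hji : j = i
    · subst hji
      rw [if_pos rfl]
      apply List.flatMap_eq_nil_iff.mpr
      intro k _
      rw [if_neg (by tauto)]
    · rw [if_neg hji]
      -- inner k loop: skip index i, shift
      have e2 : (List.range xs.length).flatMap (fun k =>
            if i ≠ j ∧ j ≠ k ∧ i ≠ k then [xs.getD i "" ++ xs.getD j "" ++ xs.getD k ""] else [])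
          = (List.range xs.length).flatMap (fun k => if k = i then [] else
              (fun t => if t = (if i < j then j - 1 else j) then []
                else [xs.getD i "" ++ (xs.eraseIdx i).getD (if i < j then j - 1 else j) "" ++ (xs.eraseIdx i).getD t ""])
              (if i < k then k - 1 else k)) := by
        apply flatMap_congr_mem
        intro k hkmem
        have hk' : k < xs.length := List.mem_range.mp hkmem
        by_cases hki : k = i
        · subst hki
          beta_reduce
          rw [if_pos rfl, if_neg (by tauto)]
        · rw [if_neg hki]
          beta_reduce
          by_cases hkj : k = j
          · subst hkj
            rw [if_neg (by tauto), if_pos rfl]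
          · have hadj : ¬ ((if i < k then k - 1 else k) = (if i < j then j - 1 else j)) := by
              split_ifs <;> omega
            rw [if_neg hadj, if_pos (by exact ⟨fun h => hji h.symm, fun h => hkj h.symm, fun h => hki h.symm⟩),
              wbL2 xs i j hj' hji, wbL2 xs i k hk' hki]
      rw [e2, wbL1 xs.length i (fun t => if t = (if i < j then j - 1 else j) then []
        else [xs.getD i "" ++ (xs.eraseIdx i).getD (if i < j then j - 1 else j) "" ++ (xs.eraseIdx i).getD t ""]) hi']
  rw [e1, wbL1 xs.length i (fun m => (List.range (xs.length - 1)).flatMap (fun t => if t = m then []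
    else [xs.getD i "" ++ (xs.eraseIdx i).getD m "" ++ (xs.eraseIdx i).getD t ""])) hi']
  rw [← hlen1]
  apply flatMap_congr_mem
  intro m hm
  have hm' : m < (xs.eraseIdx i).length := List.mem_range.mp hm
  -- inner skip on eraseIdx, then values
  have e3 : (List.range (xs.eraseIdx i).length).flatMap (fun t => if t = m then []
        else [xs.getD i "" ++ (xs.eraseIdx i).getD m "" ++ (xs.eraseIdx i).getD t ""])
      = (List.range (xs.eraseIdx i).length).flatMap (fun t => if t = m then []
          else (fun s => [xs.getD i "" ++ (xs.eraseIdx i).getD m "" ++ ((xs.eraseIdx i).eraseIdx m).getD s ""])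
          (if m < t then t - 1 else t)) := by
    apply flatMap_congr_mem
    intro t ht
    have ht' : t < (xs.eraseIdx i).length := List.mem_range.mp ht
    by_cases htm : t = m
    · simp [htm]
    · rw [if_neg htm, if_neg htm]
      beta_reduce
      rw [wbL2 (xs.eraseIdx i) m t ht' htm]
  rw [e3, wbL1 (xs.eraseIdx i).length m (fun s => [xs.getD i "" ++ (xs.eraseIdx i).getD m "" ++ ((xs.eraseIdx i).eraseIdx m).getD s ""]) hm']
  have hlen2 : ((xs.eraseIdx i).eraseIdx m).length = (xs.eraseIdx i).length - 1 := by
    rw [List.length_eraseIdx]; simp [hm']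
  rw [← hlen2, wbL0 ((xs.eraseIdx i).eraseIdx m) (fun c => [xs.getD i "" ++ (xs.eraseIdx i).getD m "" ++ c])]
  exact Eq.symm List.map_eq_flatMap

theorem wbB_mid (xs : List String) : wordBuilder_alt xs = wbMid xs := by
  unfold wordBuilder_alt wbMid
  simp only [PySem.List.foldl_append_singleton_eq_map, PySem.List.foldl_append_eq_flatMap,
    List.nil_append]
  rw [PySem.List.enumerate_eq_map_pyRange xs "", PySem.List.pyRange_one]
  simp only [List.flatMap_map, Int.sub_zero, Int.zero_add]
  apply flatMap_congr_mem
  intro i hi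
  have hi' : i < xs.length := List.mem_range.mp hi
  have hr1 : PySem.List.slice xs none (some (i : Int)) ++ PySem.List.slice xs (some ((i : Int) + 1)) none = xs.eraseIdx i := by
    rw [PySem.List.slice_to_natCast, show ((i : Int) + 1) = ((i + 1 : Nat) : Int) by push_cast; ring,
      PySem.List.slice_from_natCast]
    exact (List.eraseIdx_eq_take_drop_succ _ _).symm
  rw [hr1, PySem.List.enumerate_eq_map_pyRange (xs.eraseIdx i) "", PySem.List.pyRange_one]
  simp only [List.flatMap_map, Int.sub_zero, Int.zero_add]
  apply flatMap_congr_mem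
  intro j hj
  have hj' : j < (xs.eraseIdx i).length := by
    simpa [PySem.List.len] using List.mem_range.mp hj
  have hr2 : PySem.List.slice (xs.eraseIdx i) none (some (j : Int)) ++ PySem.List.slice (xs.eraseIdx i) (some ((j : Int) + 1)) none = (xs.eraseIdx i).eraseIdx j := by
    rw [PySem.List.slice_to_natCast, show ((j : Int) + 1) = ((j + 1 : Nat) : Int) by push_cast; ring,
      PySem.List.slice_from_natCast]
    exact (List.eraseIdx_eq_take_drop_succ _ _).symm
  rw [hr2, PySem.List.pyGetD_natCast, PySem.List.pyGetD_natCast]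

theorem wbA_mid (xs : List String) : wordBuilder xs = wbMid xs := by
  rw [wbA_nat, wbAN_mid]

-- ===== VERDICT (by name: the statement is the Claim_ definition above) =====
theorem wordBuilder_spec : Claim_equal_wordBuilder := by
  intro array _
  unfold Spec_wordBuilder
  rw [wbA_mid, wbB_mid]
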